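-- pv_equiv track=rewrite | github.com/anirudhagorai/Namaste-Assistant | core/commands.py | _augment_aliases
-- ===== SOURCE A (Python) =====
-- def _augment_aliases(name_l: str) -> set:
--   aliases = {
--     name_l,
--     name_l.replace(" ", ""),
--     name_l + ".exe",
--     name_l.replace(" ", "") + ".exe",
--   }
--   #Chrome
--   if any(k in name_l for k in ["chrome", "google"]):
--     aliases.update({"chrome", "chrome.exe", "googlechrome","google chrome", "googlechrome.exe"})
--   # VLC
--   if any(k in name_l for k in ["vlc", "media", "player"]):
--     aliases.update({"vlc", "vlc.exe", "videolan", "vlc media player", "vlcmediaplayer"})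
--   # VS Code
--   if any(k in name_l for k in ["visual studio", "vscode", "vs code", "code"]):
--     aliases.update({"code", "code.exe", "vscode", "visual studio code"})
--
--   # Calculator common names
--   if "calculator" in name_l or name_l in {"calc"}:
--     aliases.update({"calc", "calculator"})
--   # MS word
--   if any(k in name_l for k in ["winword", "word", "ms word", "microsoft word"]):
--     aliases.update({"word", "winword.exe", "ms word", "microsoft word"})
--
--   # MS excel
--   if any(k in name_l for k in ["excel", "ms excel", "microsoft excel"]):
--     aliases.update({"excel", "excel.exe", "ms excel", "microsoft excel"})
--
--   # Powerpoint
--   if "powerpoint" in name_l or "ppt" in name_l: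
--     aliases.update({"powerpnt", "powerpnt.exe", "microsoft powerpoint"})
--   # Notepad++
--   if "notepad++" in name_l:
--     aliases.update({"notepad++", "notepad++.exe"})
--   # Git Bash (common for developers)
--   if "git" in name_l:
--     aliases.update({"git", "git.exe", "git bash"})
--   return aliases
-- ===== SOURCE B (Python) =====
-- # Different algorithm: instead of scanning name_l once per keyword with `k in name_l`,
-- # enumerate every substring of name_l once and look it up in a hash map
-- # keyword -> alias-group id; fired groups are then applied in canonical order.
-- _KEYWORD_GROUP = {
--     "chrome": 0, "google": 0,
--     "vlc": 1, "media": 1, "player": 1,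
--     "visual studio": 2, "vscode": 2, "vs code": 2, "code": 2,
--     "calculator": 3,
--     "winword": 4, "word": 4, "ms word": 4, "microsoft word": 4,
--     "excel": 5, "ms excel": 5, "microsoft excel": 5,
--     "powerpoint": 6, "ppt": 6,
--     "notepad++": 7,
--     "git": 8,
-- }
-- _EXACT_GROUP = {"calc": 3}
-- _MAXKW = max(map(len, _KEYWORD_GROUP))  # longest trigger keyword (15)
-- _GROUP_ALIASES = [
--     ["chrome", "chrome.exe", "googlechrome", "google chrome", "googlechrome.exe"],
--     ["vlc", "vlc.exe", "videolan", "vlc media player", "vlcmediaplayer"],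
--     ["code", "code.exe", "vscode", "visual studio code"],
--     ["calc", "calculator"],
--     ["word", "winword.exe", "ms word", "microsoft word"],
--     ["excel", "excel.exe", "ms excel", "microsoft excel"],
--     ["powerpnt", "powerpnt.exe", "microsoft powerpoint"],
--     ["notepad++", "notepad++.exe"],
--     ["git", "git.exe", "git bash"],
-- ]
--
-- def _augment_aliases(name_l: str) -> set:
--     nospace = name_l.replace(" ", "")
--     aliases = {name_l, nospace, name_l + ".exe", nospace + ".exe"}
--     fired = [False] * len(_GROUP_ALIASES)
--     n = len(name_l)
--     for i in range(n):
--         for j in range(i + 1, min(n, i + _MAXKW) + 1):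
--             g = _KEYWORD_GROUP.get(name_l[i:j])
--             if g is not None:
--                 fired[g] = True
--     g = _EXACT_GROUP.get(name_l)
--     if g is not None:
--         fired[g] = True
--     for g, hit in enumerate(fired):
--         if hit:
--             aliases.update(_GROUP_ALIASES[g])
--     return aliases
-- ===== Notes on version B (the rewrite author's own statement) =====
-- stated objective: alternative
-- what changed: Instead of A's nine branches each scanning name_l with `k in name_l` per keyword, B enumerates every substring of name_l (up to the longest keyword length) once and looks it up in a hash map keyword -> alias-group id (plus an exact-name map for 'calc'), then applies the fired alias groups in canonical order.
import Mathlib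
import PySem

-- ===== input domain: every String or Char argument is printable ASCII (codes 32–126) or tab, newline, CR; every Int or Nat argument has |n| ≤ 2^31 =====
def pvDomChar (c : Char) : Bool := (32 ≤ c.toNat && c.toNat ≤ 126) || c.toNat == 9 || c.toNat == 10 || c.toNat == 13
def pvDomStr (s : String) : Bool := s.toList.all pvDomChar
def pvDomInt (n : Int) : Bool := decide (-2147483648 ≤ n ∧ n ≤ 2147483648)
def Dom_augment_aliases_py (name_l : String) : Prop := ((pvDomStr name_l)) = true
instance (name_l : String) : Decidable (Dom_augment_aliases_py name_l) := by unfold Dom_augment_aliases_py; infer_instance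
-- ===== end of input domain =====

-- B replaces A's nine per-keyword containment scans by one enumeration of the substrings
-- of name_l (of length up to the longest keyword) looked up in a hash map
-- keyword -> alias-group id (objective: alternative).
-- The returned Python set is modelled as the insertion-order list of its distinct elements.

-- ===== PORT A =====
def augment_aliases_py (name_l : String) : List String :=
  let ns := PySem.Str.replace name_l " " ""
  let aliases := PySem.Set.ofList [name_l, ns, name_l ++ ".exe", ns ++ ".exe"]
  let aliases := if ["chrome", "google"].any (fun k => PySem.Str.isIn k name_l) then
    PySem.Set.update aliases ["chrome", "chrome.exe", "googlechrome", "google chrome", "googlechrome.exe"] else aliases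
  let aliases := if ["vlc", "media", "player"].any (fun k => PySem.Str.isIn k name_l) then
    PySem.Set.update aliases ["vlc", "vlc.exe", "videolan", "vlc media player", "vlcmediaplayer"] else aliases
  let aliases := if ["visual studio", "vscode", "vs code", "code"].any (fun k => PySem.Str.isIn k name_l) then
    PySem.Set.update aliases ["code", "code.exe", "vscode", "visual studio code"] else aliases
  let aliases := if PySem.Str.isIn "calculator" name_l || PySem.Set.contains ["calc"] name_l then
    PySem.Set.update aliases ["calc", "calculator"] else aliases
  let aliases := if ["winword", "word", "ms word", "microsoft word"].any (fun k => PySem.Str.isIn k name_l) then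
    PySem.Set.update aliases ["word", "winword.exe", "ms word", "microsoft word"] else aliases
  let aliases := if ["excel", "ms excel", "microsoft excel"].any (fun k => PySem.Str.isIn k name_l) then
    PySem.Set.update aliases ["excel", "excel.exe", "ms excel", "microsoft excel"] else aliases
  let aliases := if PySem.Str.isIn "powerpoint" name_l || PySem.Str.isIn "ppt" name_l then
    PySem.Set.update aliases ["powerpnt", "powerpnt.exe", "microsoft powerpoint"] else aliases
  let aliases := if PySem.Str.isIn "notepad++" name_l then
    PySem.Set.update aliases ["notepad++", "notepad++.exe"] else aliases
  let aliases := if PySem.Str.isIn "git" name_l then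
    PySem.Set.update aliases ["git", "git.exe", "git bash"] else aliases
  aliases

-- ===== PORT B =====
-- Source B's hash maps and group table
def pvKeywordGroup : PySem.Dict String Nat := PySem.Dict.mk
  [ ("chrome", 0), ("google", 0),
    ("vlc", 1), ("media", 1), ("player", 1),
    ("visual studio", 2), ("vscode", 2), ("vs code", 2), ("code", 2),
    ("calculator", 3),
    ("winword", 4), ("word", 4), ("ms word", 4), ("microsoft word", 4),
    ("excel", 5), ("ms excel", 5), ("microsoft excel", 5),
    ("powerpoint", 6), ("ppt", 6),
    ("notepad++", 7),
    ("git", 8) ]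

def pvExactGroup : PySem.Dict String Nat := PySem.Dict.mk [("calc", 3)]

-- Source B's _MAXKW = max(map(len, _KEYWORD_GROUP)): the longest trigger keyword
def pvMaxKw : Int := 15

def pvGroupAliases : List (List String) :=
  [ ["chrome", "chrome.exe", "googlechrome", "google chrome", "googlechrome.exe"],
    ["vlc", "vlc.exe", "videolan", "vlc media player", "vlcmediaplayer"],
    ["code", "code.exe", "vscode", "visual studio code"],
    ["calc", "calculator"],
    ["word", "winword.exe", "ms word", "microsoft word"],
    ["excel", "excel.exe", "ms excel", "microsoft excel"],
    ["powerpnt", "powerpnt.exe", "microsoft powerpoint"],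
    ["notepad++", "notepad++.exe"],
    ["git", "git.exe", "git bash"] ]

def augment_aliases_py_alt (name_l : String) : List String :=
  let ns := PySem.Str.replace name_l " " ""
  let aliases := PySem.Set.ofList [name_l, ns, name_l ++ ".exe", ns ++ ".exe"]
  let n := PySem.Str.len name_l
  let fired : List Bool := List.replicate 9 false
  let fired := (PySem.List.pyRange 0 n 1).foldl (fun fired i =>
      (PySem.List.pyRange (i + 1) (min n (i + pvMaxKw) + 1) 1).foldl (fun fired j =>
        match PySem.Dict.get? pvKeywordGroup (PySem.Str.slice name_l (some i) (some j)) with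
        | some g => fired.set g true
        | none => fired) fired) fired
  let fired := match PySem.Dict.get? pvExactGroup name_l with
    | some g => fired.set g true
    | none => fired
  (PySem.List.enumerate fired 0).foldl (fun aliases p =>
      if p.2 then PySem.Set.update aliases (PySem.List.pyGetD pvGroupAliases p.1 []) else aliases)
    aliases

-- ===== PRECONDITION & SPEC =====
def Spec_augment_aliases_py (name_l : String) (out : List String) : Prop := out = augment_aliases_py_alt name_l
instance (name_l : String) (out : List String) : Decidable (Spec_augment_aliases_py name_l out) := by unfold Spec_augment_aliases_py; infer_instance

-- ===== CLAIM (what is proved, stated in full; the proofs are below) =====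
def Claim_equal_augment_aliases_py : Prop := ∀ (name_l : String), Dom_augment_aliases_py name_l → Spec_augment_aliases_py name_l (augment_aliases_py name_l)


-- ===== LEMMAS AND PROOFS =====

-- the keyword table as a plain pair list (proof-side view of pvKeywordGroup)
def pvPairs : List (String × Nat) :=
  [ ("chrome", 0), ("google", 0),
    ("vlc", 1), ("media", 1), ("player", 1),
    ("visual studio", 2), ("vscode", 2), ("vs code", 2), ("code", 2),
    ("calculator", 3),
    ("winword", 4), ("word", 4), ("ms word", 4), ("microsoft word", 4),
    ("excel", 5), ("ms excel", 5), ("microsoft excel", 5),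
    ("powerpoint", 6), ("ppt", 6),
    ("notepad++", 7),
    ("git", 8) ]

lemma pv_nodup : (pvPairs.map Prod.fst).Nodup := by decide

-- setting index g' to true changes exactly position g' (getD view, in-range reads)
lemma pv_getD_set (f : List Bool) (g g' : Nat) (h : g < f.length) :
    (f.set g' true).getD g false = (f.getD g false || (g' == g)) := by
  rcases eq_or_ne g' g with rfl|hne
  · simp [List.getD_eq_getElem?_getD, h]
  · simp [List.getD_eq_getElem?_getD, List.getElem?_set_ne hne, hne]

lemma pv_foldl_len {α : Type} (step : List Bool → α → List Bool)
    (hlen : ∀ f a, (step f a).length = f.length) :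
    ∀ (l : List α) (f : List Bool), (l.foldl step f).length = f.length := by
  intro l
  induction l with
  | nil => intro f; rfl
  | cons a t ih => intro f; simp only [List.foldl_cons]; rw [ih, hlen]

-- a foldl whose step or's condition c a g into position g, read back through getD
lemma pv_foldl_or_getD {α : Type} (step : List Bool → α → List Bool) (c : α → Nat → Bool)
    (hlen : ∀ f a, (step f a).length = f.length)
    (hget : ∀ f a g, g < f.length → (step f a).getD g false = (f.getD g false || c a g)) :
    ∀ (l : List α) (f : List Bool) (g : Nat), g < f.length →
      (l.foldl step f).getD g false = (f.getD g false || l.any (fun a => c a g)) := by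
  intro l
  induction l with
  | nil => intro f g hg; simp
  | cons a t ih =>
    intro f g hg
    simp only [List.foldl_cons, List.any_cons]
    rw [ih (step f a) g (by rw [hlen]; exact hg), hget f a g hg, Bool.or_assoc]

lemma pv_any_or {α : Type} (l : List α) (p q : α → Bool) :
    l.any (fun x => p x || q x) = (l.any p || l.any q) := by
  induction l with
  | nil => rfl
  | cons a t ih =>
    simp only [List.any_cons, ih]
    cases p a <;> cases q a <;> simp

-- first-match lookup in a dict with distinct keys is any-match over the pair list
lemma pv_get?_mk_any (pairs : List (String × Nat)) (h : (pairs.map Prod.fst).Nodup) (t : String) (g : Nat) :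
    (PySem.Dict.get? (PySem.Dict.mk pairs) t == some g) = pairs.any (fun p => t == p.1 && p.2 == g) := by
  induction pairs with
  | nil => simp [PySem.Dict.get?]
  | cons p rest ih =>
    simp only [List.map_cons, List.nodup_cons] at h
    rw [PySem.Dict.get?_mk_cons]
    by_cases hpt : p.1 = t
    · subst hpt
      rw [if_pos (by simp)]
      have hrest : rest.any (fun q => p.1 == q.1 && q.2 == g) = false := by
        rw [List.any_eq_false]
        intro q hq
        have : q.1 ≠ p.1 := fun he => h.1 (he ▸ List.mem_map_of_mem hq)
        simp [this.symm]
      simp [List.any_cons, hrest]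
    · rw [if_neg (by simpa using hpt)]
      rw [ih h.2]
      simp only [List.any_cons]
      have : (t == p.1) = false := by simp; exact fun he => hpt he.symm
      simp [this]

-- the double substring loop finds keyword k iff k is a substring of s
lemma pv_anyKey (s : String) (k : String) (hk : k.toList ≠ []) (hk15 : k.length ≤ 15) :
    ((PySem.List.pyRange 0 (PySem.Str.len s) 1).any (fun i =>
      (PySem.List.pyRange (i + 1) (min (PySem.Str.len s) (i + pvMaxKw) + 1) 1).any (fun j =>
        PySem.Str.slice s (some i) (some j) == k))) = PySem.Str.isIn k s := by
  have hkl : k.toList.length = k.length := by simp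
  have hsl : s.toList.length = s.length := by simp
  rw [Bool.eq_iff_iff, List.any_eq_true]
  rw [show PySem.Str.isIn k s = PySem.Chars.isIn k.toList s.toList from by simp [PySem.Str.isIn_eq]]
  rw [← PySem.Chars.exists_prefix_drop_iff_isIn k.toList s.toList]
  constructor
  · rintro ⟨i, hi, hj⟩
    rw [List.any_eq_true] at hj
    obtain ⟨j, hjm, hkey⟩ := hj
    rw [PySem.List.mem_pyRange_one] at hi hjm
    rw [beq_iff_eq] at hkey
    have h0i : 0 ≤ i := hi.1
    have h0j : 0 ≤ j := le_trans (by omega) hjm.1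
    refine ⟨i.toNat, ?_⟩
    have : (PySem.Str.slice s (some i) (some j)).toList
        = (s.toList.drop i.toNat).take (j.toNat - i.toNat) := by
      simp [PySem.List.slice_toNat _ h0i h0j]
    rw [← hkey, this]
    exact List.take_prefix _ _
  · rintro ⟨a, ha⟩
    have hlen := ha.length_le
    rw [List.length_drop] at hlen
    have hka : 0 < k.length := by rw [← hkl]; exact List.length_pos_of_ne_nil hk
    have han : a < s.length := by
      by_contra h
      push Not at h
      rw [List.drop_eq_nil_of_le (by omega)] at ha
      exact hk (List.prefix_nil.mp ha)
    refine ⟨(a : Int), ?_, ?_⟩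
    · rw [PySem.List.mem_pyRange_one, PySem.Str.len_eq]
      exact ⟨by positivity, by exact_mod_cast han⟩
    · rw [List.any_eq_true]
      refine ⟨((a : Int) + (k.length : Int)), ?_, ?_⟩
      · rw [PySem.List.mem_pyRange_one, PySem.Str.len_eq]
        have h15 : pvMaxKw = 15 := rfl
        exact ⟨by omega, by omega⟩
      · rw [beq_iff_eq, ← String.toList_inj]
        have hsl2 : (PySem.Str.slice s (some (a:Int)) (some ((a:Int) + (k.length : Int)))).toList
            = (s.toList.drop a).take k.length := by
          simp only [PySem.Str.toList_slice, PySem.Chars.slice_eq_listSlice]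
          exact PySem.List.slice_natCast_add s.toList a k.length
        rw [hsl2, ← hkl]
        exact (List.prefix_iff_eq_take.mp ha).symm

-- lookup in the keyword table, one equation per group id
lemma pv_lk0 (t : String) : (PySem.Dict.get? pvKeywordGroup t == some 0) = (t == "chrome" || t == "google") := by
  rw [show pvKeywordGroup = PySem.Dict.mk pvPairs from rfl, pv_get?_mk_any pvPairs pv_nodup]
  simp [pvPairs]
lemma pv_lk1 (t : String) : (PySem.Dict.get? pvKeywordGroup t == some 1) = (t == "vlc" || t == "media" || t == "player") := by
  rw [show pvKeywordGroup = PySem.Dict.mk pvPairs from rfl, pv_get?_mk_any pvPairs pv_nodup]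
  simp [pvPairs, Bool.or_assoc]
lemma pv_lk2 (t : String) : (PySem.Dict.get? pvKeywordGroup t == some 2) = (t == "visual studio" || t == "vscode" || t == "vs code" || t == "code") := by
  rw [show pvKeywordGroup = PySem.Dict.mk pvPairs from rfl, pv_get?_mk_any pvPairs pv_nodup]
  simp [pvPairs, Bool.or_assoc]
lemma pv_lk3 (t : String) : (PySem.Dict.get? pvKeywordGroup t == some 3) = (t == "calculator") := by
  rw [show pvKeywordGroup = PySem.Dict.mk pvPairs from rfl, pv_get?_mk_any pvPairs pv_nodup]
  simp [pvPairs]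
lemma pv_lk4 (t : String) : (PySem.Dict.get? pvKeywordGroup t == some 4) = (t == "winword" || t == "word" || t == "ms word" || t == "microsoft word") := by
  rw [show pvKeywordGroup = PySem.Dict.mk pvPairs from rfl, pv_get?_mk_any pvPairs pv_nodup]
  simp [pvPairs, Bool.or_assoc]
lemma pv_lk5 (t : String) : (PySem.Dict.get? pvKeywordGroup t == some 5) = (t == "excel" || t == "ms excel" || t == "microsoft excel") := by
  rw [show pvKeywordGroup = PySem.Dict.mk pvPairs from rfl, pv_get?_mk_any pvPairs pv_nodup]
  simp [pvPairs, Bool.or_assoc]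
lemma pv_lk6 (t : String) : (PySem.Dict.get? pvKeywordGroup t == some 6) = (t == "powerpoint" || t == "ppt") := by
  rw [show pvKeywordGroup = PySem.Dict.mk pvPairs from rfl, pv_get?_mk_any pvPairs pv_nodup]
  simp [pvPairs]
lemma pv_lk7 (t : String) : (PySem.Dict.get? pvKeywordGroup t == some 7) = (t == "notepad++") := by
  rw [show pvKeywordGroup = PySem.Dict.mk pvPairs from rfl, pv_get?_mk_any pvPairs pv_nodup]
  simp [pvPairs]
lemma pv_lk8 (t : String) : (PySem.Dict.get? pvKeywordGroup t == some 8) = (t == "git") := by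
  rw [show pvKeywordGroup = PySem.Dict.mk pvPairs from rfl, pv_get?_mk_any pvPairs pv_nodup]
  simp [pvPairs]

-- abbreviation for the substring double loop of port B
def pvLoop (name_l : String) : List Bool :=
  (PySem.List.pyRange 0 (PySem.Str.len name_l) 1).foldl (fun fired i =>
      (PySem.List.pyRange (i + 1) (min (PySem.Str.len name_l) (i + pvMaxKw) + 1) 1).foldl (fun fired j =>
        match PySem.Dict.get? pvKeywordGroup (PySem.Str.slice name_l (some i) (some j)) with
        | some g => fired.set g true
        | none => fired) fired)
    (List.replicate 9 false)

-- one keyword's contribution, as seen at position g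
def pvSub (name_l : String) (g : Nat) : Bool :=
  (PySem.List.pyRange 0 (PySem.Str.len name_l) 1).any (fun i =>
    (PySem.List.pyRange (i + 1) (min (PySem.Str.len name_l) (i + pvMaxKw) + 1) 1).any (fun j =>
      PySem.Dict.get? pvKeywordGroup (PySem.Str.slice name_l (some i) (some j)) == some g))

lemma pv_loop_getD (name_l : String) (g : Nat) (hg : g < 9) :
    (pvLoop name_l).getD g false = pvSub name_l g := by
  unfold pvLoop pvSub
  have hstep : ∀ (i : Int) (f : List Bool) (j : Int) (g : Nat), g < f.length →
      ((match PySem.Dict.get? pvKeywordGroup (PySem.Str.slice name_l (some i) (some j)) with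
        | some g => f.set g true
        | none => f) : List Bool).getD g false
      = (f.getD g false || (PySem.Dict.get? pvKeywordGroup (PySem.Str.slice name_l (some i) (some j)) == some g)) := by
    intro i f j g hgf
    cases hj : PySem.Dict.get? pvKeywordGroup (PySem.Str.slice name_l (some i) (some j)) with
    | none => simp
    | some g' => rw [pv_getD_set f g g' hgf]; simp
  have hsteplen : ∀ (i : Int) (f : List Bool) (j : Int),
      ((match PySem.Dict.get? pvKeywordGroup (PySem.Str.slice name_l (some i) (some j)) with
        | some g => f.set g true
        | none => f) : List Bool).length = f.length := by
    intro i f j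
    cases PySem.Dict.get? pvKeywordGroup (PySem.Str.slice name_l (some i) (some j)) <;> simp
  have hinner : ∀ (i : Int) (f : List Bool) (g : Nat), g < f.length →
      ((PySem.List.pyRange (i + 1) (min (PySem.Str.len name_l) (i + pvMaxKw) + 1) 1).foldl (fun fired j =>
        match PySem.Dict.get? pvKeywordGroup (PySem.Str.slice name_l (some i) (some j)) with
        | some g => fired.set g true
        | none => fired) f).getD g false
      = (f.getD g false || (PySem.List.pyRange (i + 1) (min (PySem.Str.len name_l) (i + pvMaxKw) + 1) 1).any (fun j =>
          PySem.Dict.get? pvKeywordGroup (PySem.Str.slice name_l (some i) (some j)) == some g)) :=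
    fun i f g hgf =>
      pv_foldl_or_getD
        (fun fired j => match PySem.Dict.get? pvKeywordGroup (PySem.Str.slice name_l (some i) (some j)) with
          | some g => fired.set g true
          | none => fired)
        (fun j g => PySem.Dict.get? pvKeywordGroup (PySem.Str.slice name_l (some i) (some j)) == some g)
        (fun f j => hsteplen i f j) (fun f j g h => hstep i f j g h)
        (PySem.List.pyRange (i + 1) (min (PySem.Str.len name_l) (i + pvMaxKw) + 1) 1) f g hgf
  have hinnerlen : ∀ (i : Int) (f : List Bool),
      ((PySem.List.pyRange (i + 1) (min (PySem.Str.len name_l) (i + pvMaxKw) + 1) 1).foldl (fun fired j =>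
        match PySem.Dict.get? pvKeywordGroup (PySem.Str.slice name_l (some i) (some j)) with
        | some g => fired.set g true
        | none => fired) f).length = f.length :=
    fun i f =>
      pv_foldl_len
        (fun fired j => match PySem.Dict.get? pvKeywordGroup (PySem.Str.slice name_l (some i) (some j)) with
          | some g => fired.set g true
          | none => fired)
        (fun f j => hsteplen i f j)
        (PySem.List.pyRange (i + 1) (min (PySem.Str.len name_l) (i + pvMaxKw) + 1) 1) f
  have hmain := pv_foldl_or_getD
    (fun fired i => (PySem.List.pyRange (i + 1) (min (PySem.Str.len name_l) (i + pvMaxKw) + 1) 1).foldl (fun fired j =>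
        match PySem.Dict.get? pvKeywordGroup (PySem.Str.slice name_l (some i) (some j)) with
        | some g => fired.set g true
        | none => fired) fired)
    (fun i g => (PySem.List.pyRange (i + 1) (min (PySem.Str.len name_l) (i + pvMaxKw) + 1) 1).any (fun j =>
        PySem.Dict.get? pvKeywordGroup (PySem.Str.slice name_l (some i) (some j)) == some g))
    (fun f i => hinnerlen i f) (fun f i g h => hinner i f g h)
    (PySem.List.pyRange 0 (PySem.Str.len name_l) 1) (List.replicate 9 false) g (by simpa using hg)
  rw [hmain]
  rw [show (List.replicate 9 false).getD g false = false from by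
    rw [List.getD_eq_getElem _ _ (by simpa using hg)]; exact List.getElem_replicate _]
  rw [Bool.false_or]

-- pvLoop, spelled out: entry g holds iff some keyword of group g occurs in name_l
lemma pv_loop_eq (name_l : String) :
    pvLoop name_l =
      [ PySem.Str.isIn "chrome" name_l || PySem.Str.isIn "google" name_l,
        PySem.Str.isIn "vlc" name_l || PySem.Str.isIn "media" name_l || PySem.Str.isIn "player" name_l,
        PySem.Str.isIn "visual studio" name_l || PySem.Str.isIn "vscode" name_l || PySem.Str.isIn "vs code" name_l || PySem.Str.isIn "code" name_l,
        PySem.Str.isIn "calculator" name_l,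
        PySem.Str.isIn "winword" name_l || PySem.Str.isIn "word" name_l || PySem.Str.isIn "ms word" name_l || PySem.Str.isIn "microsoft word" name_l,
        PySem.Str.isIn "excel" name_l || PySem.Str.isIn "ms excel" name_l || PySem.Str.isIn "microsoft excel" name_l,
        PySem.Str.isIn "powerpoint" name_l || PySem.Str.isIn "ppt" name_l,
        PySem.Str.isIn "notepad++" name_l,
        PySem.Str.isIn "git" name_l ] := by
  have hlen : (pvLoop name_l).length = 9 := by
    unfold pvLoop
    rw [pv_foldl_len]
    · simp
    · intro f i
      rw [pv_foldl_len]
      intro f j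
      cases PySem.Dict.get? pvKeywordGroup (PySem.Str.slice name_l (some i) (some j)) <;> simp
  apply List.ext_getElem (by simp [hlen])
  intro i hi hi'
  have hgd : (pvLoop name_l)[i] = (pvLoop name_l).getD i false := by
    rw [List.getD_eq_getElem _ _ hi]
  have h9 : i < 9 := by simpa using hi'
  rw [hgd, pv_loop_getD name_l i h9]
  unfold pvSub
  interval_cases i <;>
    simp only [pv_lk0, pv_lk1, pv_lk2, pv_lk3, pv_lk4, pv_lk5, pv_lk6, pv_lk7, pv_lk8,
      pv_any_or,
      pv_anyKey _ "chrome" (by decide) (by decide),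
      pv_anyKey _ "google" (by decide) (by decide),
      pv_anyKey _ "vlc" (by decide) (by decide),
      pv_anyKey _ "media" (by decide) (by decide),
      pv_anyKey _ "player" (by decide) (by decide),
      pv_anyKey _ "visual studio" (by decide) (by decide),
      pv_anyKey _ "vscode" (by decide) (by decide),
      pv_anyKey _ "vs code" (by decide) (by decide),
      pv_anyKey _ "code" (by decide) (by decide),
      pv_anyKey _ "calculator" (by decide) (by decide),
      pv_anyKey _ "winword" (by decide) (by decide),
      pv_anyKey _ "word" (by decide) (by decide),
      pv_anyKey _ "ms word" (by decide) (by decide),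
      pv_anyKey _ "microsoft word" (by decide) (by decide),
      pv_anyKey _ "excel" (by decide) (by decide),
      pv_anyKey _ "ms excel" (by decide) (by decide),
      pv_anyKey _ "microsoft excel" (by decide) (by decide),
      pv_anyKey _ "powerpoint" (by decide) (by decide),
      pv_anyKey _ "ppt" (by decide) (by decide),
      pv_anyKey _ "notepad++" (by decide) (by decide),
      pv_anyKey _ "git" (by decide) (by decide)] <;> rfl

-- ===== VERDICT (by name: the statement is the Claim_ definition above) =====
theorem augment_aliases_py_spec : Claim_equal_augment_aliases_py := by
  intro name_l _
  show augment_aliases_py name_l = augment_aliases_py_alt name_l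
  by_cases hc : name_l = "calc"
  · subst hc; decide
  · have halt : augment_aliases_py_alt name_l =
        (PySem.List.enumerate (match PySem.Dict.get? pvExactGroup name_l with
           | some g => (pvLoop name_l).set g true
           | none => pvLoop name_l) 0).foldl
          (fun aliases p => if p.2 then PySem.Set.update aliases (PySem.List.pyGetD pvGroupAliases p.1 []) else aliases)
          (PySem.Set.ofList [name_l, PySem.Str.replace name_l " " "",
            name_l ++ ".exe", PySem.Str.replace name_l " " "" ++ ".exe"]) := rfl
    have hex : PySem.Dict.get? pvExactGroup name_l = none := by
      rw [show pvExactGroup = PySem.Dict.mk [("calc", 3)] from rfl, PySem.Dict.get?_mk_cons]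
      rw [if_neg (by simp; exact fun h => hc h.symm)]
      simp [PySem.Dict.get?]
    have hcontains : PySem.Set.contains ["calc"] name_l = false := by
      simp [PySem.Set.contains, hc]
    have henum : ∀ (b0 b1 b2 b3 b4 b5 b6 b7 b8 : Bool),
        PySem.List.enumerate [b0, b1, b2, b3, b4, b5, b6, b7, b8] 0 =
          [(0, b0), (1, b1), (2, b2), (3, b3), (4, b4), (5, b5), (6, b6), (7, b7), (8, b8)] := by
      intros; rfl
    have hg0 : PySem.List.pyGetD pvGroupAliases 0 [] = ["chrome", "chrome.exe", "googlechrome", "google chrome", "googlechrome.exe"] := rfl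
    have hg1 : PySem.List.pyGetD pvGroupAliases 1 [] = ["vlc", "vlc.exe", "videolan", "vlc media player", "vlcmediaplayer"] := rfl
    have hg2 : PySem.List.pyGetD pvGroupAliases 2 [] = ["code", "code.exe", "vscode", "visual studio code"] := rfl
    have hg3 : PySem.List.pyGetD pvGroupAliases 3 [] = ["calc", "calculator"] := rfl
    have hg4 : PySem.List.pyGetD pvGroupAliases 4 [] = ["word", "winword.exe", "ms word", "microsoft word"] := rfl
    have hg5 : PySem.List.pyGetD pvGroupAliases 5 [] = ["excel", "excel.exe", "ms excel", "microsoft excel"] := rfl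
    have hg6 : PySem.List.pyGetD pvGroupAliases 6 [] = ["powerpnt", "powerpnt.exe", "microsoft powerpoint"] := rfl
    have hg7 : PySem.List.pyGetD pvGroupAliases 7 [] = ["notepad++", "notepad++.exe"] := rfl
    have hg8 : PySem.List.pyGetD pvGroupAliases 8 [] = ["git", "git.exe", "git bash"] := rfl
    rw [halt, hex, pv_loop_eq, henum]
    simp only [List.foldl_cons, List.foldl_nil, hg0, hg1, hg2, hg3, hg4, hg5, hg6, hg7, hg8]
    simp only [augment_aliases_py, List.any_cons, List.any_nil, Bool.or_false, Bool.or_assoc, hcontains]
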